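-- pv_equiv track=rewrite | github.com/MinKyeom/KMK-DREAM | Programmers/lv2/귤고르기.py | solution
-- ===== SOURCE A (Python) =====
-- def solution(k, tangerine):
--     count = {}
--     for x in tangerine:
--         if not str(x) in count:
--             count[str(x)] = 1
--         else:
--             count[str(x)] += 1
--
--     count = sorted(count.items(), key=lambda x: -x[1])
--
--     result = []
--
--     for y, z in count:
--         if k > 0:
--             result.append(y)
--             k -= z
--         else:
--             break
--
--     return len(result)
-- ===== SOURCE B (Python) =====
-- def solution(k, tangerine):
--     counts = {}
--     for x in tangerine:
--         counts[x] = counts.get(x, 0) + 1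
--     vals = list(counts.values())
--     freq_of_freq = {}
--     for f in vals:
--         freq_of_freq[f] = freq_of_freq.get(f, 0) + 1
--     f = max(vals, default=0)
--     picked = 0
--     while f >= 1 and k > 0:
--         for _ in range(freq_of_freq.get(f, 0)):
--             if k <= 0:
--                 break
--             picked += 1
--             k -= f
--         f -= 1
--     return picked
-- ===== Notes on version B (the rewrite author's own statement) =====
-- stated objective: alternative
-- what changed: Replaces A's comparison sort of the (str(size), count) pairs by a counting-sort-style reverse histogram (count of counts) walked from the largest frequency down to 1, decrementing k one size at a time; sizes are kept as int keys instead of strings.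
import Mathlib
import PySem

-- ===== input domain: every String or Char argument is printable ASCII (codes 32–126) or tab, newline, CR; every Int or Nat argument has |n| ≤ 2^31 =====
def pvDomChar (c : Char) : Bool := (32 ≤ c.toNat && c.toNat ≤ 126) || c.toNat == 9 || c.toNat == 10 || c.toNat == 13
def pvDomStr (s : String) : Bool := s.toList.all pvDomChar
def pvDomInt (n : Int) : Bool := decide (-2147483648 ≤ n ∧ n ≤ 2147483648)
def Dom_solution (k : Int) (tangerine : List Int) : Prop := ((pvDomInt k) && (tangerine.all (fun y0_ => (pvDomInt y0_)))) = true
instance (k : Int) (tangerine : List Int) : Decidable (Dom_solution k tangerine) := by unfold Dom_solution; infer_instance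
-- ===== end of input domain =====

-- B replaces A's sort of the (size, count) pairs by a reverse histogram (count-of-counts) walked
-- from the largest frequency down — counting sort in spirit; objective: alternative algorithm.

-- ===== PORT A =====
-- the 'for y, z in count: … break' greedy loop, accumulating result
def greedyA (k : Int) (cs : List (String × Int)) (res : List String) : List String :=
  match cs with
  | [] => res
  | (y, z) :: rest => if k > 0 then greedyA (k - z) rest (res ++ [y]) else res

def solution (k : Int) (tangerine : List Int) : Int :=
  let count := tangerine.foldl (fun d x =>
    if !(d.contains (PySem.Int.toStr x)) then d.insert (PySem.Int.toStr x) 1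
    else d.modify (PySem.Int.toStr x) 0 (· + 1)) PySem.Dict.empty
  let cs := PySem.List.sorted count.items (fun p => -p.2) false
  ((greedyA k cs []).length : Int)

-- ===== PORT B =====
-- the 'for _ in range(cnt): if k <= 0: break; picked += 1; k -= f' inner loop; state (k, picked)
def innerB (f : Int) : Nat → Int × Int → Int × Int
  | 0, st => st
  | n + 1, (k, picked) => if k ≤ 0 then (k, picked) else innerB f n (k - f, picked + 1)

-- the 'while f >= 1 and k > 0: …; f -= 1' loop; fuel n is the current value of f
def outerB (ff : PySem.Dict Int Int) : Nat → Int × Int → Int × Int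
  | 0, st => st
  | n + 1, st =>
    if st.1 > 0 then outerB ff n (innerB ((n : Int) + 1) ((ff.getD ((n : Int) + 1) 0).toNat) st)
    else st

def solution_alt (k : Int) (tangerine : List Int) : Int :=
  let counts := tangerine.foldl (fun d x => d.insert x (d.getD x 0 + 1)) PySem.Dict.empty
  let vals := counts.values
  let ff := vals.foldl (fun d f => d.insert f (d.getD f 0 + 1)) PySem.Dict.empty
  let maxf := PySem.List.maxD vals (fun y => y) 0
  (outerB ff maxf.toNat (k, 0)).2

-- ===== PRECONDITION & SPEC =====
def Spec_solution (k : Int) (tangerine : List Int) (out : Int) : Prop := out = solution_alt k tangerine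
instance (k : Int) (tangerine : List Int) (out : Int) : Decidable (Spec_solution k tangerine out) := by unfold Spec_solution; infer_instance

-- ===== CLAIM (what is proved, stated in full; the proofs are below) =====
def Claim_equal_solution : Prop := ∀ (k : Int) (tangerine : List Int), Dom_solution k tangerine → Spec_solution k tangerine (solution k tangerine)

-- ===== LEMMAS AND PROOFS =====

-- Both greedy loops are the same fold over the list of frequencies taken in descending order.
def pvStep (st : Int × Int) (z : Int) : Int × Int := if st.1 > 0 then (st.1 - z, st.2 + 1) else st

theorem pvStep_stuck (l : List Int) (st : Int × Int) (h : st.1 ≤ 0) :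
    l.foldl pvStep st = st := by
  induction l with
  | nil => rfl
  | cons z t ih => simpa [pvStep, not_lt.mpr h] using ih

theorem pvStep_offset (l : List Int) (k c : Int) :
    (l.foldl pvStep (k, c)).2 = c + (l.foldl pvStep (k, 0)).2 := by
  induction l generalizing k c with
  | nil => simp
  | cons z t ih =>
    by_cases hk : k > 0
    · simp only [List.foldl_cons, pvStep, hk, if_pos]
      rw [ih (k - z) (c + 1), ih (k - z) (0 + 1)]
      ring
    · rw [List.foldl_cons, List.foldl_cons]
      simp only [pvStep, hk, if_false]
      rw [pvStep_stuck t (k, c) (by simpa using not_lt.mp hk),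
          pvStep_stuck t (k, 0) (by simpa using not_lt.mp hk)]
      simp

theorem greedyA_length (cs : List (String × Int)) : ∀ (k : Int) (res : List String),
    ((greedyA k cs res).length : Int) = res.length + ((cs.map (·.2)).foldl pvStep (k, 0)).2 := by
  induction cs with
  | nil => intro k res; simp [greedyA]
  | cons p t ih =>
    intro k res
    obtain ⟨y, z⟩ := p
    by_cases hk : k > 0
    · simp only [greedyA, hk, if_pos, List.map_cons, List.foldl_cons, pvStep]
      rw [ih (k - z) (res ++ [y]), pvStep_offset ((t.map (·.2))) (k - z) (0 + 1)]
      simp only [List.length_append, List.length_cons, List.length_nil]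
      push_cast
      ring
    · simp only [greedyA, hk, if_false, List.map_cons, List.foldl_cons, pvStep]
      rw [pvStep_stuck (t.map (·.2)) (k, 0) (by simpa using not_lt.mp hk)]
      simp

theorem innerB_eq (f : Int) : ∀ (n : Nat) (st : Int × Int),
    innerB f n st = (List.replicate n f).foldl pvStep st := by
  intro n
  induction n with
  | zero => intro st; rfl
  | succ m ih =>
    intro st
    obtain ⟨k, c⟩ := st
    by_cases hk : k ≤ 0
    · simp only [innerB, hk, if_pos]
      rw [pvStep_stuck _ _ hk]
    · simp only [innerB, hk, if_false, List.replicate_succ, List.foldl_cons, pvStep]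
      rw [ih (k - f, c + 1)]
      simp [not_le.mp hk]

-- frequencies f = n, n-1, …, 1, each repeated as often as the histogram says
def pvBlocks (ff : PySem.Dict Int Int) : Nat → List Int
  | 0 => []
  | n + 1 => List.replicate ((ff.getD ((n : Int) + 1) 0).toNat) ((n : Int) + 1) ++ pvBlocks ff n

theorem outerB_eq (ff : PySem.Dict Int Int) : ∀ (n : Nat) (st : Int × Int),
    outerB ff n st = (pvBlocks ff n).foldl pvStep st := by
  intro n
  induction n with
  | zero => intro st; rfl
  | succ m ih =>
    intro st
    by_cases hk : st.1 > 0
    · simp only [outerB, hk, if_pos, pvBlocks, List.foldl_append]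
      rw [ih, innerB_eq]
    · simp only [outerB, hk, if_false, pvBlocks]
      rw [pvStep_stuck _ _ (not_lt.mp hk)]

theorem count_pvBlocks (vals : List Int) : ∀ (n : Nat) (c : Int),
    (pvBlocks (PySem.Dict.counter vals) n).count c =
      if 1 ≤ c ∧ c ≤ (n : Int) then vals.count c else 0 := by
  intro n
  induction n with
  | zero =>
    intro c
    simp only [pvBlocks, List.count_nil]
    split_ifs with h
    · omega
    · rfl
  | succ m ih =>
    intro c
    simp only [pvBlocks, List.count_append, List.count_replicate, ih c,
      PySem.Dict.getD_counter]
    by_cases hc : c = (m : Int) + 1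
    · subst hc
      simp only [beq_self_eq_true, if_pos, Int.toNat_natCast]
      have h1 : ¬ ((1 : Int) ≤ (m : Int) + 1 ∧ (m : Int) + 1 ≤ (m : Int)) := by omega
      have h2 : (1 : Int) ≤ (m : Int) + 1 ∧ (m : Int) + 1 ≤ ((m + 1 : Nat) : Int) := by push_cast; omega
      rw [if_neg h1, if_pos h2]
      omega
    · have hb : (((m : Int) + 1) == c) = false := by
        rw [beq_eq_false_iff_ne]
        exact fun hh => hc hh.symm
      simp only [hb, if_false, Bool.false_eq_true, Nat.zero_add]
      have : ((1 : Int) ≤ c ∧ c ≤ (m : Int)) ↔ ((1 : Int) ≤ c ∧ c ≤ ((m + 1 : Nat) : Int)) := by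
        push_cast; omega
      rw [if_congr this rfl rfl]

theorem mem_pvBlocks (ff : PySem.Dict Int Int) : ∀ (n : Nat) (x : Int),
    x ∈ pvBlocks ff n → 1 ≤ x ∧ x ≤ (n : Int) := by
  intro n
  induction n with
  | zero => intro x hx; simp [pvBlocks] at hx
  | succ m ih =>
    intro x hx
    simp only [pvBlocks, List.mem_append, List.mem_replicate] at hx
    rcases hx with ⟨-, h⟩ | h
    · subst h; constructor <;> push_cast <;> omega
    · have := ih x h; push_cast; omega

theorem pairwise_pvBlocks (ff : PySem.Dict Int Int) : ∀ (n : Nat),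
    (pvBlocks ff n).Pairwise (fun a b => b ≤ a) := by
  intro n
  induction n with
  | zero => simp [pvBlocks]
  | succ m ih =>
    simp only [pvBlocks]
    rw [List.pairwise_append]
    refine ⟨List.pairwise_replicate.mpr (Or.inr le_rfl), ih, ?_⟩
    intro a ha b hb
    rw [List.mem_replicate] at ha
    have := mem_pvBlocks ff m b hb
    omega

-- str(·) is injective on the integers
theorem pvDigitChar_inj : ∀ x < 10, ∀ y < 10, Nat.digitChar x = Nat.digitChar y → x = y := by decide

theorem pvToDigits_inj : ∀ (a b : Nat), Nat.toDigits 10 a = Nat.toDigits 10 b → a = b := by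
  intro a
  induction a using Nat.strong_induction_on with
  | _ a iha =>
    intro b h
    rw [Nat.toDigits_eq_if (b := 10) (n := a) (by norm_num), Nat.toDigits_eq_if (b := 10) (n := b) (by norm_num)] at h
    by_cases ha : a < 10 <;> by_cases hb : b < 10
    · rw [if_pos ha, if_pos hb] at h
      exact pvDigitChar_inj a ha b hb (by simpa using h)
    · rw [if_pos ha, if_neg hb] at h
      have := congrArg List.length h
      simp only [List.length_cons, List.length_nil, List.length_append] at this
      have := @Nat.length_toDigits_pos 10 (b / 10)
      omega
    · rw [if_neg ha, if_pos hb] at h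
      have := congrArg List.length h
      simp only [List.length_cons, List.length_nil, List.length_append] at this
      have := @Nat.length_toDigits_pos 10 (a / 10)
      omega
    · rw [if_neg ha, if_neg hb] at h
      have h' := congrArg List.reverse h
      simp only [List.reverse_append, List.reverse_cons, List.reverse_nil, List.nil_append,
        List.cons_append, List.cons.injEq] at h'
      obtain ⟨hc, hrest⟩ := h'
      have hq : a / 10 = b / 10 :=
        iha (a / 10) (by omega) (b / 10) (List.reverse_injective hrest)
      have hr : a % 10 = b % 10 :=
        pvDigitChar_inj (a % 10) (by omega) (b % 10) (by omega) hc
      omega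

theorem pvToChars_inj : Function.Injective PySem.Int.toChars := by
  intro a b h
  simp only [PySem.Int.toChars] at h
  by_cases ha : a < 0 <;> by_cases hb : b < 0
  · rw [if_pos ha, if_pos hb] at h
    simp only [List.cons.injEq, true_and] at h
    have := pvToDigits_inj _ _ h
    omega
  · rw [if_pos ha, if_neg hb] at h
    obtain ⟨c, t, hct⟩ : ∃ c t, Nat.toDigits 10 b.toNat = c :: t := by
      cases hd : Nat.toDigits 10 b.toNat with
      | nil => exact absurd (congrArg List.length hd) (by simpa using (@Nat.length_toDigits_pos 10 b.toNat).ne')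
      | cons c t => exact ⟨c, t, rfl⟩
    rw [hct] at h
    have hdig : c.isDigit = true :=
      Nat.isDigit_of_mem_toDigits (by norm_num) (by norm_num) (hct ▸ List.mem_cons_self)
    have : c = '-' := by simpa using (List.cons.injEq .. ▸ h).1.symm
    rw [this] at hdig
    exact absurd hdig (by decide)
  · rw [if_neg ha, if_pos hb] at h
    obtain ⟨c, t, hct⟩ : ∃ c t, Nat.toDigits 10 a.toNat = c :: t := by
      cases hd : Nat.toDigits 10 a.toNat with
      | nil => exact absurd (congrArg List.length hd) (by simpa using (@Nat.length_toDigits_pos 10 a.toNat).ne')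
      | cons c t => exact ⟨c, t, rfl⟩
    rw [hct] at h
    have hdig : c.isDigit = true :=
      Nat.isDigit_of_mem_toDigits (by norm_num) (by norm_num) (hct ▸ List.mem_cons_self)
    have : c = '-' := by simpa using (List.cons.injEq .. ▸ h).1
    rw [this] at hdig
    exact absurd hdig (by decide)
  · rw [if_neg ha, if_neg hb] at h
    have := pvToDigits_inj _ _ h
    omega

theorem pvToStr_inj : Function.Injective PySem.Int.toStr := by
  intro a b h
  apply pvToChars_inj
  have := congrArg String.toList h
  rwa [PySem.Int.toList_toStr, PySem.Int.toList_toStr] at this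

-- set(map f xs) = map f (set(xs)) for injective f
theorem pvSet_ofList_map (f : Int → String) (hf : Function.Injective f) (xs : List Int) :
    PySem.Set.ofList (xs.map f) = (PySem.Set.ofList xs).map f := by
  induction xs with
  | nil => simp [PySem.Set.ofList_nil]
  | cons x t ih =>
    rw [List.map_cons, PySem.Set.ofList_cons, PySem.Set.ofList_cons, ih, List.map_cons]
    congr 1
    simp only [PySem.Set.discard, List.filter_map]
    congr 1
    apply List.filter_congr
    intro y _
    simp [Function.comp, hf.eq_iff]

-- A's counting loop is Counter(map(str, tangerine))
theorem pvCountA_eq (t : List Int) :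
    t.foldl (fun d x =>
      if !(d.contains (PySem.Int.toStr x)) then d.insert (PySem.Int.toStr x) 1
      else d.modify (PySem.Int.toStr x) 0 (· + 1)) PySem.Dict.empty =
    PySem.Dict.counter (t.map PySem.Int.toStr) := by
  rw [PySem.Dict.counter_eq_foldl, List.foldl_map]
  apply PySem.List.foldl_congr_mem
  intro d x _
  by_cases hc : d.contains (PySem.Int.toStr x) = true
  · simp [hc]
  · simp only [Bool.not_eq_true] at hc
    simp [hc, PySem.Dict.modify, PySem.Dict.getD_of_not_contains d 0 hc]

-- the heart of the proof: A's descending-sorted frequency list IS B's histogram walk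
theorem pv_key (t vals : List Int)
    (hvals : vals = (PySem.Set.ofList t).map (fun v => ((t.count v : Nat) : Int))) :
    (PySem.List.sorted (PySem.Dict.counter (t.map PySem.Int.toStr)).items
        (fun p => -p.2) false).map (·.2) =
      pvBlocks (PySem.Dict.counter vals) (PySem.List.maxD vals (fun y => y) 0).toNat := by
  have hmem : ∀ v ∈ vals, 1 ≤ v ∧ v ≤ PySem.List.maxD vals (fun y => y) 0 := by
    intro v hv
    constructor
    · rw [hvals] at hv
      obtain ⟨u, hu, rfl⟩ := List.mem_map.mp hv
      have : u ∈ t := (PySem.Set.mem_ofList t u).mp hu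
      have := List.count_pos_iff.mpr this
      omega
    · rcases vals with _ | ⟨x, tl⟩
      · simp at hv
      · rw [PySem.List.maxD_id_cons]
        rcases List.mem_cons.mp hv with rfl | hv'
        · exact (PySem.List.le_foldl_max tl v).1
        · exact (PySem.List.le_foldl_max tl x).2 v hv'
  have hmaxf0 : 0 ≤ PySem.List.maxD vals (fun y => y) 0 := by
    by_cases hn : vals = []
    · simp [hn, PySem.List.maxD_nil]
    · have hmm := PySem.List.maxD_mem vals (fun y => y) 0 hn
      have := hmem _ hmm
      omega
  apply PySem.List.eq_of_perm_of_pairwise_le_of_injective (fun z : Int => -z) neg_injective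
  · -- both lists are rearrangements of Counter(tangerine).values()
    have hperm1 : ((PySem.List.sorted (PySem.Dict.counter (t.map PySem.Int.toStr)).items
        (fun p => -p.2) false).map (·.2)).Perm vals := by
      refine List.Perm.trans (List.Perm.map _ (PySem.List.sorted_perm _ _ _)) ?_
      rw [PySem.Dict.items_counter, List.map_map, pvSet_ofList_map _ pvToStr_inj, List.map_map,
          hvals]
      apply List.Perm.of_eq
      apply List.map_congr_left
      intro u hu
      simp only [Function.comp]
      rw [List.count_map_of_injective t PySem.Int.toStr pvToStr_inj u]
    refine hperm1.trans (List.perm_iff_count.mpr ?_).symm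
    intro c
    rw [count_pvBlocks]
    split_ifs with h
    · rfl
    · symm
      rw [List.count_eq_zero]
      intro hc
      have := hmem c hc
      rw [Int.toNat_of_nonneg hmaxf0] at h
      omega
  · -- A's sorted list is weakly descending
    rw [List.pairwise_map]
    have := PySem.List.sorted_pairwise (PySem.Dict.counter (t.map PySem.Int.toStr)).items
      (fun p => -p.2)
    exact this.imp (fun h => h)
  · -- B's histogram walk is weakly descending
    have := pairwise_pvBlocks (PySem.Dict.counter vals)
      (PySem.List.maxD vals (fun y => y) 0).toNat
    exact this.imp (fun h => by omega)

theorem solution_spec' (k : Int) (t : List Int) : solution k t = solution_alt k t := by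
  rw [solution, solution_alt]
  rw [pvCountA_eq, PySem.Dict.foldl_insert_getD_add_one_eq_counter,
      PySem.Dict.foldl_insert_getD_add_one_eq_counter]
  have hv : (PySem.Dict.counter t).values =
      (PySem.Set.ofList t).map (fun v => ((t.count v : Nat) : Int)) := by
    simp only [PySem.Dict.values, PySem.Dict.items_counter, List.map_map]
    rfl
  rw [outerB_eq, greedyA_length, pv_key t _ hv]
  simp

-- ===== VERDICT (by name: the statement is the Claim_ definition above) =====
theorem solution_spec : Claim_equal_solution := by
  intro k tangerine _
  unfold Spec_solution
  exact solution_spec' k tangerine
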